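-- pv_equiv track=rewrite | github.com/zizudana/python-for-coding-test | 프로그래머스/파일명정렬.py | solution
-- ===== SOURCE A (Python) =====
-- def solution(files):
-- 	answer = []
-- 	file_dic = {}
-- 	for i in range(len(files)):
-- 		file_dic[i] = list(files[i])
-- 	for name in list(file_dic.values()):
-- 		for c in name:
-- 			if c.isalpha():
-- 				c = c.lower()
-- 			else:
-- 				break
-- 	file_dic = dict(sorted(file_dic.items(), key=lambda x: x[1]))
-- 	for n in range(len(file_dic)):
-- 		temp = ""
-- 		for i in range(len(file_dic[n])):
-- 			if file_dic[n][i].isdigit():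
-- 				while file_dic[n][i].isdigit():
-- 					temp += file_dic[n][i]
-- 					i += 1
-- 				break
-- 		file_dic[n] = int(temp)
-- 	file_dic = dict(sorted(file_dic.items(), key=lambda x: x[1]))
-- 	for i in list(file_dic.keys()):
-- 		answer.append(files[i])
-- 	return answer
-- ===== SOURCE B (Python) =====
-- # B: one composite-key sort (number, then full filename) instead of A's index-dict and two stable sorts.
-- def solution(files):
--     def num(f):
--         rest = f
--         while rest and not rest[0].isdigit():
--             rest = rest[1:]
--         run = ""
--         while rest and rest[0].isdigit():
--             run += rest[0]
--             rest = rest[1:]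
--         return int(run)  # ValueError when the name has no digit (as A's int(''))
--     return sorted(files, key=lambda f: (num(f), f))
-- ===== Notes on version B (the rewrite author's own statement) =====
-- stated objective: simpler
-- what changed: Replaces A's index-keyed dict, dead lowercasing loop, in-place value overwriting and two separate stable sorts with a single sorted() over the list using the composite key (leading number, full filename).
-- crash fix: When every filename contains a digit but some filename's first digit run extends to the end of the name, A raises IndexError (its inner while runs past the end of the char list) while B returns the correctly sorted list. — e.g. on solution(["b2", "a10"]): A raises IndexError, B returns ["b2", "a10"]
import Mathlib
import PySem

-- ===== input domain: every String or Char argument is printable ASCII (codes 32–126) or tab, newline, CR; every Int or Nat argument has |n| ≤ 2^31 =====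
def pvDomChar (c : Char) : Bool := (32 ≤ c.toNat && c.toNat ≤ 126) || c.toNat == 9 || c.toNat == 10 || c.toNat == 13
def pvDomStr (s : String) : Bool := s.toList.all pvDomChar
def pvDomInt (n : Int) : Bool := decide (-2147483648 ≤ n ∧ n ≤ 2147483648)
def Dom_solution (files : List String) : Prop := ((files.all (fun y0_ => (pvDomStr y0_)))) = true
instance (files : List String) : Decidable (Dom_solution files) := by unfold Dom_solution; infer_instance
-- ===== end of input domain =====

-- B replaces A's index-keyed dict, dead lowercasing loop, in-place overwrites and two stable sorts
-- with one composite-key sort (leading number, then the full filename); objective: simpler.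

-- ===== PORT A =====
-- inner `while file_dic[n][i].isdigit()` loop; when i runs off the end Python raises
-- IndexError (excluded by Pre_solution), the port returns the accumulated temp there
def aWhile (l : List Char) (i : Nat) (temp : List Char) : List Char :=
  if h : i < l.length then
    if PySem.Chars.isdigit l[i] then aWhile l (i + 1) (temp ++ [l[i]]) else temp
  else temp
termination_by l.length - i

-- outer `for i in range(len(file_dic[n]))` loop with its `if … isdigit()` and `break`
def aScan (l : List Char) (i : Nat) : List Char :=
  if h : i < l.length then
    if PySem.Chars.isdigit l[i] then aWhile l i [] else aScan l (i + 1)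
  else []
termination_by l.length - i

-- int(temp): `none` is Python's ValueError on temp == '' (no digit in the name), excluded by Pre_solution
def aNum (l : List Char) : Int := (PySem.Int.ofChars? (aScan l 0)).getD 0

-- the dict's values are first char lists, later ints: modelled as a sum type
def aCharOf : Sum (List Char) Int → List Char
  | .inl l => l
  | .inr _ => []

def aIntOf : Sum (List Char) Int → Int
  | .inl _ => 0
  | .inr z => z

-- for i in range(len(files)): file_dic[i] = list(files[i])
def aD0 (files : List String) : PySem.Dict Int (Sum (List Char) Int) :=
  (PySem.List.pyRange 0 (PySem.List.len files)).foldl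
    (fun d i => d.insert i (Sum.inl (PySem.List.pyGetD files i "").toList)) PySem.Dict.empty

-- A's `for name in list(file_dic.values()): for c in name: …` only rebinds the local c
-- and then discards it: it has no effect on any state, so there is nothing to port

-- file_dic = dict(sorted(file_dic.items(), key=lambda x: x[1]))  (all values are char lists here)
def aD1 (files : List String) : PySem.Dict Int (Sum (List Char) Int) :=
  PySem.Dict.ofList (PySem.List.sorted (aD0 files).items (fun p => aCharOf p.2) false)

-- for n in range(len(file_dic)): … file_dic[n] = int(temp)
def aD2 (files : List String) : PySem.Dict Int (Sum (List Char) Int) :=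
  (PySem.List.pyRange 0 (((aD1 files).size : Nat) : Int)).foldl
    (fun d n => d.insert n (Sum.inr (aNum (aCharOf (d.getD n (Sum.inl [])))))) (aD1 files)

-- file_dic = dict(sorted(file_dic.items(), key=lambda x: x[1]))  (all values are ints here)
def aD3 (files : List String) : PySem.Dict Int (Sum (List Char) Int) :=
  PySem.Dict.ofList (PySem.List.sorted (aD2 files).items (fun p => aIntOf p.2) false)

-- for i in list(file_dic.keys()): answer.append(files[i])
def solution (files : List String) : List String :=
  (aD3 files).keys.foldl (fun acc i => acc ++ [PySem.List.pyGetD files i ""]) []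

-- ===== PORT B =====
-- the two `while rest and …: rest = rest[1:]` loops of Source B's num()
def altNum (f : String) : Int :=
  let rest := f.toList.dropWhile (fun c => !PySem.Chars.isdigit c)
  let run := rest.takeWhile (fun c => PySem.Chars.isdigit c)
  -- int(run): `none` is Python's ValueError on run == '' (no digit), excluded by Pre_solution
  (PySem.Int.ofChars? run).getD 0

def solution_alt (files : List String) : List String :=
  PySem.List.sorted2 files (fun f => altNum f) (fun f => f) false

-- ===== PRECONDITION & SPEC =====
-- Pre_ excludes exactly the names on which Python A raises: a name with no digit at all
-- (int('') → ValueError, in both programs) and a name whose first digit run reaches the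
-- end of the name (A's inner while indexes past the end → IndexError).
def Pre_solution (files : List String) : Prop :=
  ∀ f ∈ files,
    (f.toList.dropWhile (fun c => !PySem.Chars.isdigit c)) ≠ [] ∧
    ¬ ((f.toList.dropWhile (fun c => !PySem.Chars.isdigit c)).all (fun c => PySem.Chars.isdigit c) = true)
instance (files : List String) : Decidable (Pre_solution files) := by unfold Pre_solution; infer_instance

def pvWitness_solution : List String := ["img12.png", "img10.png", "F-5 x", "img02.png", "IMG01.GIF"]

-- When every filename contains a digit but some filename's first digit run extends to the end
-- of the name, A raises IndexError while B returns the correctly sorted list.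
def Raises_solution (files : List String) : Prop :=
  (∀ f ∈ files, (f.toList.dropWhile (fun c => !PySem.Chars.isdigit c)) ≠ []) ∧
  (∃ f ∈ files, (f.toList.dropWhile (fun c => !PySem.Chars.isdigit c)).all (fun c => PySem.Chars.isdigit c) = true)
instance (files : List String) : Decidable (Raises_solution files) := by unfold Raises_solution; infer_instance

def pvRaiseWitness_solution : List String := ["b2", "a10"]
def pvRaiseWitnessOut_solution : List String := ["b2", "a10"]

def Spec_solution (files : List String) (out : List String) : Prop := out = solution_alt files
instance (files : List String) (out : List String) : Decidable (Spec_solution files out) := by unfold Spec_solution; infer_instance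

-- ===== CLAIM (what is proved, stated in full; the proofs are below) =====
def Claim_equal_solution : Prop := ∀ (files : List String), Dom_solution files → Pre_solution files → Spec_solution files (solution files)
def Claim_raises_solution : Prop := (∀ (files : List String), Dom_solution files → Raises_solution files → ¬ Pre_solution files) ∧ (Dom_solution (pvRaiseWitness_solution) ∧ Raises_solution (pvRaiseWitness_solution) ∧ solution_alt (pvRaiseWitness_solution) = pvRaiseWitnessOut_solution)

-- ===== LEMMAS AND PROOFS =====

-- the insertion sort underlying PySem.List.sorted / sorted2, with an explicit comparator
def isort {α : Type} (lt : α → α → Bool) (xs : List α) : List α :=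
  xs.foldl (fun acc x => PySem.List.insertBy lt x acc) []

theorem mem_foldl_insertBy {α : Type} (lt : α → α → Bool) :
    ∀ (xs acc : List α) (y : α), y ∈ xs.foldl (fun acc x => PySem.List.insertBy lt x acc) acc →
      y ∈ acc ∨ y ∈ xs := by
  intro xs
  induction xs with
  | nil => intro acc y h; exact Or.inl h
  | cons x xs ih =>
    intro acc y h
    rcases ih _ y h with h' | h'
    · rcases (PySem.List.mem_insertBy lt x y acc).1 h' with h'' | h''
      · exact Or.inr (by simp [h''])
      · exact Or.inl h''
    · exact Or.inr (List.mem_cons_of_mem _ h')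

theorem insertBy_filter_neg {α : Type} (lt : α → α → Bool) (p : α → Bool) (x : α)
    (hx : p x = false) : ∀ (acc : List α),
    (PySem.List.insertBy lt x acc).filter p = acc.filter p := by
  intro acc
  induction acc with
  | nil => simp [PySem.List.insertBy, hx]
  | cons y ys ih =>
    by_cases h : lt x y = true
    · simp [PySem.List.insertBy, h, hx]
    · simp only [PySem.List.insertBy, Bool.not_eq_true] at *
      rw [if_neg (by simp [h])]
      simp [List.filter_cons, ih]

theorem insertBy_filter_pos {α : Type} (lt : α → α → Bool) (p : α → Bool) (x : α)
    (htr : ∀ a b c, lt a b = true → lt c b = false → lt a c = true)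
    (hx : p x = true) : ∀ (acc : List α), acc.Pairwise (fun a b => lt b a = false) →
    (PySem.List.insertBy lt x acc).filter p = PySem.List.insertBy lt x (acc.filter p) := by
  intro acc
  induction acc with
  | nil => simp [PySem.List.insertBy, hx]
  | cons y ys ih =>
    intro hpw
    have hpw' := List.Pairwise.of_cons hpw
    have hy : ∀ z ∈ ys, lt z y = false := fun z hz => List.rel_of_pairwise_cons hpw hz
    by_cases h : lt x y = true
    · -- x goes in front of y
      by_cases hpy : p y = true
      · simp [PySem.List.insertBy, h, hx, hpy]
      · -- y filtered out: x still lands in front of the filtered tail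
        rw [show PySem.List.insertBy lt x (y :: ys) = x :: y :: ys by simp [PySem.List.insertBy, h]]
        have hfront : ∀ z ∈ ys.filter p, lt x z = true := by
          intro z hz
          exact htr x y z h (hy z (List.mem_of_mem_filter hz))
        rw [List.filter_cons_of_pos hx, List.filter_cons_of_neg (by simp [hpy])]
        cases hf : ys.filter p with
        | nil => simp [PySem.List.insertBy]
        | cons z zs =>
          have : lt x z = true := hfront z (by rw [hf]; exact List.mem_cons_self)
          simp [PySem.List.insertBy, this]
    · rw [show PySem.List.insertBy lt x (y :: ys) = y :: PySem.List.insertBy lt x ys by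
            simp [PySem.List.insertBy, h]]
      by_cases hpy : p y = true
      · rw [List.filter_cons_of_pos hpy, List.filter_cons_of_pos hpy, ih hpw',
            show PySem.List.insertBy lt x (y :: ys.filter p)
              = y :: PySem.List.insertBy lt x (ys.filter p) by simp [PySem.List.insertBy, h]]
      · rw [List.filter_cons_of_neg (by simp [hpy]), List.filter_cons_of_neg (by simp [hpy]),
            ih hpw']

theorem insertBy_pairwise {α : Type} (lt : α → α → Bool)
    (hasym : ∀ a b, lt a b = true → lt b a = false)
    (htr : ∀ a b c, lt a b = true → lt c b = false → lt a c = true)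
    (x : α) : ∀ (acc : List α), acc.Pairwise (fun a b => lt b a = false) →
    (PySem.List.insertBy lt x acc).Pairwise (fun a b => lt b a = false) := by
  intro acc
  induction acc with
  | nil => simp [PySem.List.insertBy]
  | cons y ys ih =>
    intro hpw
    have hpw' := List.Pairwise.of_cons hpw
    have hy : ∀ z ∈ ys, lt z y = false := fun z hz => List.rel_of_pairwise_cons hpw hz
    by_cases h : lt x y = true
    · rw [show PySem.List.insertBy lt x (y :: ys) = x :: y :: ys by simp [PySem.List.insertBy, h]]
      exact List.Pairwise.cons
        (fun z hz => by
          rcases List.mem_cons.1 hz with rfl | hz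
          · exact hasym x z h
          · exact hasym x z (htr x y z h (hy z hz)))
        hpw
    · rw [show PySem.List.insertBy lt x (y :: ys) = y :: PySem.List.insertBy lt x ys by
            simp [PySem.List.insertBy, h]]
      exact List.Pairwise.cons
        (fun z hz => by
          rcases (PySem.List.mem_insertBy lt x z ys).1 hz with rfl | hz
          · simpa using h
          · exact hy z hz)
        (ih hpw')

theorem foldl_insertBy_pairwise {α : Type} (lt : α → α → Bool)
    (hasym : ∀ a b, lt a b = true → lt b a = false)
    (htr : ∀ a b c, lt a b = true → lt c b = false → lt a c = true) :
    ∀ (xs acc : List α), acc.Pairwise (fun a b => lt b a = false) →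
    (xs.foldl (fun acc x => PySem.List.insertBy lt x acc) acc).Pairwise (fun a b => lt b a = false) := by
  intro xs
  induction xs with
  | nil => intro acc h; exact h
  | cons x xs ih => intro acc h; exact ih _ (insertBy_pairwise lt hasym htr x acc h)

theorem isort_pairwise {α : Type} (lt : α → α → Bool)
    (hasym : ∀ a b, lt a b = true → lt b a = false)
    (htr : ∀ a b c, lt a b = true → lt c b = false → lt a c = true)
    (xs : List α) : (isort lt xs).Pairwise (fun a b => lt b a = false) :=
  foldl_insertBy_pairwise lt hasym htr xs [] (List.Pairwise.nil)

theorem isort_filter {α : Type} (lt : α → α → Bool) (p : α → Bool)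
    (hasym : ∀ a b, lt a b = true → lt b a = false)
    (htr : ∀ a b c, lt a b = true → lt c b = false → lt a c = true)
    (xs : List α) : (isort lt xs).filter p = isort lt (xs.filter p) := by
  suffices h : ∀ (xs acc : List α), acc.Pairwise (fun a b => lt b a = false) →
      (xs.foldl (fun acc x => PySem.List.insertBy lt x acc) acc).filter p
        = (xs.filter p).foldl (fun acc x => PySem.List.insertBy lt x acc) (acc.filter p) by
    simpa using h xs [] List.Pairwise.nil
  intro xs
  induction xs with
  | nil => intro acc _; rfl
  | cons x xs ih =>
    intro acc hpw
    have hins := insertBy_pairwise lt hasym htr x acc hpw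
    by_cases hx : p x = true
    · rw [List.filter_cons_of_pos hx]
      simp only [List.foldl_cons]
      rw [ih _ hins, insertBy_filter_pos lt p x htr hx acc hpw]
    · rw [List.filter_cons_of_neg (by simp [hx])]
      simp only [List.foldl_cons]
      rw [ih _ hins, insertBy_filter_neg lt p x (by simpa using hx) acc]

-- stable sorting keeps an all-ties list unchanged
theorem isort_all_false {α : Type} (lt : α → α → Bool) :
    ∀ (xs acc : List α), (∀ x ∈ xs, ∀ y ∈ acc, lt x y = false) →
      (∀ x ∈ xs, ∀ y ∈ xs, lt x y = false) →
      xs.foldl (fun acc x => PySem.List.insertBy lt x acc) acc = acc ++ xs := by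
  intro xs
  induction xs with
  | nil => intro acc _ _; simp
  | cons x xs ih =>
    intro acc hacc hxs
    have h1 : ∀ y ∈ acc, lt x y = false := hacc x List.mem_cons_self
    simp only [List.foldl_cons]
    rw [PySem.List.insertBy_of_forall_not_before lt x acc h1]
    rw [ih (acc ++ [x])
        (fun z hz y hy => by
          rcases List.mem_append.1 hy with hy | hy
          · exact hacc z (List.mem_cons_of_mem _ hz) y hy
          · rcases List.mem_singleton.1 hy with rfl
            exact hxs z (List.mem_cons_of_mem _ hz) y List.mem_cons_self)
        (fun z hz y hy => hxs z (List.mem_cons_of_mem _ hz) y (List.mem_cons_of_mem _ hy))]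
    simp

theorem insertBy_congr {α : Type} (lt lt' : α → α → Bool) (x : α) :
    ∀ (acc : List α), (∀ y ∈ acc, lt x y = lt' x y) →
      PySem.List.insertBy lt x acc = PySem.List.insertBy lt' x acc := by
  intro acc
  induction acc with
  | nil => intro _; rfl
  | cons y ys ih =>
    intro h
    have hy := h y List.mem_cons_self
    by_cases hxy : lt x y = true
    · simp [PySem.List.insertBy, hxy, hy ▸ hxy]
    · have : lt' x y = false := by rw [← hy]; simpa using hxy
      simp [PySem.List.insertBy, hxy, this, ih (fun z hz => h z (List.mem_cons_of_mem _ hz))]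

theorem isort_congr {α : Type} (lt lt' : α → α → Bool) :
    ∀ (xs acc : List α), (∀ a, (a ∈ xs ∨ a ∈ acc) → ∀ b, (b ∈ xs ∨ b ∈ acc) → lt a b = lt' a b) →
      xs.foldl (fun acc x => PySem.List.insertBy lt x acc) acc
        = xs.foldl (fun acc x => PySem.List.insertBy lt' x acc) acc := by
  intro xs
  induction xs with
  | nil => intro acc _; rfl
  | cons x xs ih =>
    intro acc h
    simp only [List.foldl_cons]
    rw [insertBy_congr lt lt' x acc
        (fun y hy => h x (Or.inl List.mem_cons_self) y (Or.inr hy))]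
    exact ih _ (fun a ha b hb => by
      apply h
      · rcases ha with ha | ha
        · exact Or.inl (List.mem_cons_of_mem _ ha)
        · rcases (PySem.List.mem_insertBy lt' x a acc).1 ha with rfl | ha
          · exact Or.inl List.mem_cons_self
          · exact Or.inr ha
      · rcases hb with hb | hb
        · exact Or.inl (List.mem_cons_of_mem _ hb)
        · rcases (PySem.List.mem_insertBy lt' x b acc).1 hb with rfl | hb
          · exact Or.inl List.mem_cons_self
          · exact Or.inr hb)

-- two ≤-sorted lists with identical tie classes are equal
theorem eq_of_pairwise_filter {α κ : Type} [LinearOrder κ] (key : α → κ) :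
    ∀ (L M : List α), L.Pairwise (fun a b => key a ≤ key b) → M.Pairwise (fun a b => key a ≤ key b) →
      (∀ c, L.filter (fun x => decide (key x = c)) = M.filter (fun x => decide (key x = c))) →
      L = M := by
  intro L
  induction L with
  | nil =>
    intro M _ _ hf
    cases M with
    | nil => rfl
    | cons b M' =>
      exfalso
      have := hf (key b)
      rw [List.filter_cons_of_pos (by simp)] at this
      simp at this
  | cons a L' ih =>
    intro M hL hM hf
    cases M with
    | nil =>
      exfalso
      have := hf (key a)
      rw [List.filter_cons_of_pos (by simp)] at this
      simp at this
    | cons b M' =>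
      have hLl : ∀ z ∈ L', key a ≤ key z := fun z hz => List.rel_of_pairwise_cons hL hz
      have hMl : ∀ z ∈ M', key b ≤ key z := fun z hz => List.rel_of_pairwise_cons hM hz
      -- the two minimal keys agree
      have hab : key a = key b := by
        have h1 : key b ≤ key a := by
          have := hf (key a)
          rw [List.filter_cons_of_pos (by simp)] at this
          have hmem : a ∈ (b :: M').filter (fun x => decide (key x = key a)) := by
            rw [← this]; exact List.mem_cons_self
          have := List.of_mem_filter hmem
          have hmem' := List.mem_of_mem_filter hmem
          rcases List.mem_cons.1 hmem' with rfl | hmem'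
          · exact le_refl _
          · exact hMl a hmem'
        have h2 : key a ≤ key b := by
          have := hf (key b)
          rw [List.filter_cons_of_pos (α := α) (p := fun x => decide (key x = key b)) (by simp)
              (l := M')] at this
          have hmem : b ∈ (a :: L').filter (fun x => decide (key x = key b)) := by
            rw [this]; exact List.mem_cons_self
          have hmem' := List.mem_of_mem_filter hmem
          rcases List.mem_cons.1 hmem' with rfl | hmem'
          · exact le_refl _
          · exact hLl b hmem'
        exact le_antisymm h2 h1
      have hkey := hf (key a)
      rw [List.filter_cons_of_pos (by simp), List.filter_cons_of_pos (by simp [hab])] at hkey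
      have hhead : a = b := (List.cons.injEq _ _ _ _ ▸ hkey).1
      have htails : ∀ c, L'.filter (fun x => decide (key x = c)) = M'.filter (fun x => decide (key x = c)) := by
        intro c
        by_cases hc : key a = c
        · subst hc
          exact (List.cons.injEq _ _ _ _ ▸ hkey).2
        · have := hf c
          rw [List.filter_cons_of_neg (by simp [hc]),
              List.filter_cons_of_neg (by simp [hab ▸ hc])] at this
          exact this
      rw [hhead, ih M' (List.Pairwise.of_cons hL) (List.Pairwise.of_cons hM) htails]

-- THE CORE THEOREM: a stable sort by k2 after a stable sort by k1 is
-- the single stable sort by the lexicographic key (k2, k1)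
theorem isort_compose {α κ₁ κ₂ : Type} [LinearOrder κ₁] [LinearOrder κ₂]
    (k1 : α → κ₁) (k2 : α → κ₂) (xs : List α) :
    isort (fun a b => decide (k2 a < k2 b)) (isort (fun a b => decide (k1 a < k1 b)) xs)
      = isort (fun a b => decide (k2 a < k2 b) || (!decide (k2 b < k2 a) && decide (k1 a < k1 b))) xs := by
  have hasym2 : ∀ a b : α, decide (k2 a < k2 b) = true → decide (k2 b < k2 a) = false := by
    intro a b h; simp only [decide_eq_true_eq] at h; simpa using lt_asymm h
  have htr2 : ∀ a b c : α, decide (k2 a < k2 b) = true → decide (k2 c < k2 b) = false →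
      decide (k2 a < k2 c) = true := by
    intro a b c h h'
    simp only [decide_eq_true_eq] at h ⊢
    simp only [decide_eq_false_iff_not] at h'
    exact lt_of_lt_of_le h (not_lt.1 h')
  have hasym1 : ∀ a b : α, decide (k1 a < k1 b) = true → decide (k1 b < k1 a) = false := by
    intro a b h; simp only [decide_eq_true_eq] at h; simpa using lt_asymm h
  set ltL : α → α → Bool :=
    fun a b => decide (k2 a < k2 b) || (!decide (k2 b < k2 a) && decide (k1 a < k1 b)) with hltL
  have hasymL : ∀ a b : α, ltL a b = true → ltL b a = false := by
    intro a b h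
    simp only [hltL, Bool.or_eq_true, Bool.and_eq_true, Bool.not_eq_eq_eq_not, Bool.not_true,
      decide_eq_true_eq, decide_eq_false_iff_not] at h
    simp only [hltL, Bool.or_eq_false_iff, Bool.and_eq_false_iff, Bool.not_eq_false',
      decide_eq_true_eq, decide_eq_false_iff_not]
    rcases h with h | ⟨h1, h2⟩
    · exact ⟨lt_asymm h, Or.inl h⟩
    · exact ⟨h1, Or.inr (lt_asymm h2)⟩
  have htrL : ∀ a b c : α, ltL a b = true → ltL c b = false → ltL a c = true := by
    intro a b c h h'
    simp only [hltL, Bool.or_eq_true, Bool.and_eq_true, Bool.not_eq_eq_eq_not, Bool.not_true,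
      decide_eq_true_eq, decide_eq_false_iff_not] at h ⊢
    simp only [hltL, Bool.or_eq_false_iff, Bool.and_eq_false_iff, Bool.not_eq_false',
      decide_eq_true_eq, decide_eq_false_iff_not] at h'
    obtain ⟨h1', h2'⟩ := h'
    rcases h with h | ⟨h1, h2⟩
    · exact Or.inl (lt_of_lt_of_le h (not_lt.1 h1'))
    · -- k2: ¬ b < a, k1: a < b
      by_cases hbc : k2 b < k2 c
      · exact Or.inl (lt_of_le_of_lt (not_lt.1 h1) hbc)
      · have hk2bc : k2 b = k2 c := le_antisymm (not_lt.1 h1') (not_lt.1 hbc)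
        rcases h2' with hbc' | h2''
        · exact absurd hbc' hbc
        · by_cases hac : k2 a < k2 c
          · exact Or.inl hac
          · refine Or.inr ⟨fun hca => absurd (hk2bc ▸ hca : k2 b < k2 a) h1, ?_⟩
            exact lt_of_lt_of_le h2 (not_lt.1 h2'')
  apply eq_of_pairwise_filter k2
  · exact (isort_pairwise _ hasym2 htr2 _).imp
      (fun h => not_lt.1 (by simpa using h))
  · exact (isort_pairwise ltL hasymL htrL _).imp
      (fun h => not_lt.1 (by
        simp only [hltL, Bool.or_eq_false_iff, decide_eq_false_iff_not] at h
        exact h.1))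
  · intro c
    have hkey : ∀ {l : List α} {x : α}, x ∈ l.filter (fun x => decide (k2 x = c)) → k2 x = c :=
      fun h => of_decide_eq_true (List.mem_filter.1 h).2
    rw [isort_filter _ _ hasym2 htr2, isort_filter _ _ hasymL htrL]
    have hid : isort (fun a b => decide (k2 a < k2 b))
        ((isort (fun a b => decide (k1 a < k1 b)) xs).filter (fun x => decide (k2 x = c)))
        = (isort (fun a b => decide (k1 a < k1 b)) xs).filter (fun x => decide (k2 x = c)) := by
      have := isort_all_false (fun a b : α => decide (k2 a < k2 b))
        ((isort (fun a b => decide (k1 a < k1 b)) xs).filter (fun x => decide (k2 x = c))) []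
        (by intro x _ y hy; simp at hy)
        (by intro x hx y hy; simp [hkey hx, hkey hy])
      simpa [isort] using this
    rw [hid, isort_filter _ _ hasym1
        (fun a b c h h' => by
          simp only [decide_eq_true_eq] at h ⊢
          simp only [decide_eq_false_iff_not] at h'
          exact lt_of_lt_of_le h (not_lt.1 h'))]
    exact (isort_congr ltL (fun a b => decide (k1 a < k1 b)) _ []
      (by
        intro a ha b hb
        have ha' : k2 a = c := hkey (by simpa using ha)
        have hb' : k2 b = c := hkey (by simpa using hb)
        simp [hltL, ha', hb'])).symm

theorem isort_map {α β : Type} (lt : α → α → Bool) (lt' : β → β → Bool) (f : α → β)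
    (h : ∀ a b, lt' (f a) (f b) = lt a b) :
    ∀ (xs acc : List α),
      (xs.map f).foldl (fun acc x => PySem.List.insertBy lt' x acc) (acc.map f)
        = (xs.foldl (fun acc x => PySem.List.insertBy lt x acc) acc).map f := by
  have hins : ∀ (x : α) (acc : List α),
      PySem.List.insertBy lt' (f x) (acc.map f) = (PySem.List.insertBy lt x acc).map f := by
    intro x acc
    induction acc with
    | nil => simp [PySem.List.insertBy]
    | cons y ys ih =>
      by_cases hxy : lt x y = true
      · simp [PySem.List.insertBy, h, hxy]
      · simp [PySem.List.insertBy, h, hxy, ih]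
  intro xs
  induction xs with
  | nil => intro acc; rfl
  | cons x xs ih =>
    intro acc
    simp only [List.map_cons, List.foldl_cons]
    rw [hins x acc]
    exact ih _

-- ===== the reduction of port A to the composed insertion sort =====

def ePairs (files : List String) : List (Int × List Char) :=
  (List.range files.length).map (fun i => (((i : Nat) : Int), (files.getD i "").toList))

theorem aWhile_eq (l : List Char) (i : Nat) (temp : List Char) :
    aWhile l i temp = temp ++ (l.drop i).takeWhile (fun c => PySem.Chars.isdigit c) := by
  induction i, temp using aWhile.induct l with
  | case1 i temp h hd ih =>
    rw [aWhile, dif_pos h, if_pos hd, ih, List.drop_eq_getElem_cons h,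
      List.takeWhile_cons_of_pos hd]
    simp
  | case2 i temp h hd =>
    rw [aWhile, dif_pos h, if_neg hd, List.drop_eq_getElem_cons h,
      List.takeWhile_cons_of_neg (by simpa using hd)]
    simp
  | case3 i temp h =>
    rw [aWhile, dif_neg h, List.drop_eq_nil_of_le (by omega)]
    simp

theorem aScan_eq (l : List Char) (i : Nat) :
    aScan l i = ((l.drop i).dropWhile (fun c => !PySem.Chars.isdigit c)).takeWhile
      (fun c => PySem.Chars.isdigit c) := by
  induction i using aScan.induct l with
  | case1 i h hd =>
    rw [aScan, dif_pos h, if_pos hd, aWhile_eq, List.drop_eq_getElem_cons h,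
      List.dropWhile_cons_of_neg (by simpa using hd)]
    simp [← List.drop_eq_getElem_cons h]
  | case2 i h hd ih =>
    rw [aScan, dif_pos h, if_neg hd, ih, List.drop_eq_getElem_cons h,
      List.dropWhile_cons_of_pos (by simpa using hd)]
  | case3 i h =>
    rw [aScan, dif_neg h, List.drop_eq_nil_of_le (by omega)]
    simp

theorem aNum_eq_altNum (l : List Char) : aNum l = altNum (String.ofList l) := by
  simp [aNum, altNum, String.toList_ofList, aScan_eq]

-- A's `for n in range(len(file_dic)): file_dic[n] = int(temp)` loop: overwriting every
-- (distinct, present) key in place maps the values and keeps the item order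
theorem loop_items {ν : Type} (F : ν → ν) (dflt : ν) :
    ∀ (ks : List Int) (d : PySem.Dict Int ν), ks.Nodup → d.keys.Nodup →
      (∀ k ∈ ks, d.contains k = true) →
      (ks.foldl (fun d n => d.insert n (F (d.getD n dflt))) d).items
        = d.items.map (fun p => if p.1 ∈ ks then (p.1, F (d.getD p.1 dflt)) else p) := by
  intro ks
  induction ks with
  | nil => intro d _ _ _; simp
  | cons k ks ih =>
    intro d hnd hkeys hct
    have hk : d.contains k = true := hct k List.mem_cons_self
    have hknotin : k ∉ ks := (List.nodup_cons.1 hnd).1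
    set d' := d.insert k (F (d.getD k dflt)) with hd'
    have hitems' : d'.items = d.items.map (fun p => if p.1 == k then (k, F (d.getD k dflt)) else p) :=
      PySem.Dict.items_insert_of_contains d _ hk
    have hkeys' : d'.keys = d.keys := PySem.Dict.keys_insert_of_contains d _ hk
    have hct' : ∀ j ∈ ks, d'.contains j = true := by
      intro j hj
      rw [PySem.Dict.contains_iff_mem_keys, hkeys', ← PySem.Dict.contains_iff_mem_keys]
      exact hct j (List.mem_cons_of_mem _ hj)
    have hgd : ∀ j : Int, j ≠ k → d'.getD j dflt = d.getD j dflt := by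
      intro j hj
      exact PySem.Dict.getD_insert_of_ne d _ _ hj
    simp only [List.foldl_cons]
    rw [ih d' (List.nodup_cons.1 hnd).2 (hkeys' ▸ hkeys) hct', hitems', List.map_map]
    apply List.map_congr_left
    intro p _
    by_cases hpk : p.1 = k
    · simp only [Function.comp, hpk, BEq.rfl]
      simp [hknotin]
    · simp only [Function.comp, beq_iff_eq, hpk, if_false]
      by_cases hpm : p.1 ∈ ks
      · simp [hpm, hpk, hgd p.1 hpk]
      · simp [hpm, hpk]

def wInl (p : Int × List Char) : Int × Sum (List Char) Int := (p.1, Sum.inl p.2)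

theorem items_ofList_of_nodup {ν : Type} (l : List (Int × ν))
    (h : (l.map Prod.fst).Nodup) : (PySem.Dict.ofList l).items = l := by
  unfold PySem.Dict.ofList PySem.Dict.update
  rw [PySem.Dict.items_foldl_insert_fresh l Prod.fst Prod.snd PySem.Dict.empty
      (fun a _ => PySem.Dict.contains_empty _) h]
  simp [PySem.Dict.empty]

theorem aD0_items (files : List String) :
    (aD0 files).items = (ePairs files).map wInl := by
  unfold aD0
  have hlen : PySem.List.len files = ((files.length : Nat) : Int) := rfl
  rw [hlen, PySem.List.pyRange_zero_natCast, List.foldl_map]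
  rw [PySem.Dict.items_foldl_insert_fresh (List.range files.length)
      (fun i => ((i : Nat) : Int)) (fun i => Sum.inl (PySem.List.pyGetD files ((i : Nat) : Int) "").toList)
      PySem.Dict.empty (fun a _ => PySem.Dict.contains_empty _)
      (List.Nodup.map (fun a b h => by exact_mod_cast h) List.nodup_range)]
  simp [ePairs, PySem.List.pyGetD_natCast, wInl, PySem.Dict.empty, Function.comp]

theorem ePairs_fst_nodup (files : List String) :
    ((ePairs files).map Prod.fst).Nodup := by
  simp only [ePairs, List.map_map]
  exact List.Nodup.map (fun a b h => by simpa using h) List.nodup_range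

def lt1 (a b : Int × List Char) : Bool := decide (a.2 < b.2)
def lt2 (a b : Int × List Char) : Bool := decide (aNum a.2 < aNum b.2)
def ltL (a b : Int × List Char) : Bool := lt2 a b || (!lt2 b a && lt1 a b)

theorem s1_eq (files : List String) :
    PySem.List.sorted (aD0 files).items (fun p => aCharOf p.2) false
      = (isort lt1 (ePairs files)).map wInl := by
  rw [aD0_items, PySem.List.sorted_eq_foldl_insertBy]
  have := isort_map lt1 (fun a b => decide (aCharOf a.2 < aCharOf b.2))
    wInl (fun a b => rfl) (ePairs files) []
  simpa [isort] using this

theorem s1_fst_nodup (files : List String) :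
    (((isort lt1 (ePairs files)).map wInl).map Prod.fst).Nodup := by
  have hperm : (isort lt1 (ePairs files)).Perm (ePairs files) := by
    have : isort lt1 (ePairs files)
        = PySem.List.sorted (ePairs files) (fun p => p.2) false := by
      rw [PySem.List.sorted_eq_foldl_insertBy]; rfl
    rw [this]
    exact PySem.List.sorted_perm _ _ _
  have := (hperm.map Prod.fst).nodup_iff.2 (ePairs_fst_nodup files)
  simpa [List.map_map, wInl, Function.comp] using this

theorem aD1_items (files : List String) :
    (aD1 files).items = (isort lt1 (ePairs files)).map wInl := by
  rw [aD1, s1_eq, items_ofList_of_nodup _ (s1_fst_nodup files)]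

theorem aD2_items (files : List String) :
    (aD2 files).items = (isort lt1 (ePairs files)).map (fun p => (p.1, Sum.inr (aNum p.2))) := by
  have hkeys : (aD1 files).keys = ((isort lt1 (ePairs files)).map wInl).map Prod.fst := by
    rw [← aD1_items]; rfl
  have hnodup : (aD1 files).keys.Nodup := by rw [hkeys]; exact s1_fst_nodup files
  have hsize : (aD1 files).size = files.length := by
    have : (aD1 files).size = (aD1 files).items.length := rfl
    rw [this, aD1_items, List.length_map]
    have : isort lt1 (ePairs files)
        = PySem.List.sorted (ePairs files) (fun p => p.2) false := by
      rw [PySem.List.sorted_eq_foldl_insertBy]; rfl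
    rw [this, PySem.List.length_sorted]
    simp [ePairs]
  have hct : ∀ k ∈ PySem.List.pyRange 0 ((files.length : Nat) : Int), (aD1 files).contains k = true := by
    intro k hk
    rw [PySem.List.pyRange_zero_natCast] at hk
    obtain ⟨i, hi, rfl⟩ := List.mem_map.1 hk
    rw [PySem.Dict.contains_iff_mem_keys, hkeys]
    have hperm : (isort lt1 (ePairs files)).Perm (ePairs files) := by
      have h2 : isort lt1 (ePairs files)
          = PySem.List.sorted (ePairs files) (fun p => p.2) false := by
        rw [PySem.List.sorted_eq_foldl_insertBy]; rfl
      rw [h2]; exact PySem.List.sorted_perm _ _ _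
    simp only [List.map_map]
    refine ((hperm.map (Prod.fst ∘ wInl)).mem_iff).2 ?_
    simp only [List.mem_map, Function.comp, wInl]
    exact ⟨(((i : Nat) : Int), (files.getD i "").toList),
      List.mem_map.2 ⟨i, hi, rfl⟩, rfl⟩
  unfold aD2
  rw [hsize, loop_items (fun v => Sum.inr (aNum (aCharOf v))) (Sum.inl ([] : List Char)) _ _
      (by rw [PySem.List.pyRange_zero_natCast]
          exact List.Nodup.map (fun a b h => by exact_mod_cast h) List.nodup_range)
      hnodup hct]
  rw [aD1_items, List.map_map]
  apply List.map_congr_left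
  intro p hp
  have hmemitems : wInl p ∈ (aD1 files).items := by
    rw [aD1_items]
    exact List.mem_map.2 ⟨p, hp, rfl⟩
  have hgd : (aD1 files).getD p.1 (Sum.inl []) = Sum.inl p.2 :=
    PySem.Dict.getD_of_mem_items _ (by simpa [wInl] using hmemitems) hnodup _
  have hperm : (isort lt1 (ePairs files)).Perm (ePairs files) := by
    have h2 : isort lt1 (ePairs files)
        = PySem.List.sorted (ePairs files) (fun p => p.2) false := by
      rw [PySem.List.sorted_eq_foldl_insertBy]; rfl
    rw [h2]; exact PySem.List.sorted_perm _ _ _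
  have hpmem : p ∈ ePairs files := hperm.mem_iff.1 hp
  have hp1 : p.1 ∈ PySem.List.pyRange 0 ((files.length : Nat) : Int) := by
    rw [PySem.List.pyRange_zero_natCast]
    obtain ⟨i, hi, rfl⟩ := List.mem_map.1 hpmem
    exact List.mem_map.2 ⟨i, hi, rfl⟩
  simp only [Function.comp, wInl]
  rw [if_pos hp1, hgd]
  rfl

theorem isort_lt2_lt1 (files : List String) :
    isort lt2 (isort lt1 (ePairs files)) = isort ltL (ePairs files) := by
  unfold ltL lt2 lt1
  have h := isort_compose (fun p : Int × List Char => p.2) (fun p => aNum p.2) (ePairs files)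
  -- align the two (propositionally equal) Decidable instances on List Char comparison
  convert h using 3
  all_goals try funext a
  all_goals try funext b
  all_goals rw [Bool.eq_iff_iff]
  all_goals simp

def w2 (p : Int × List Char) : Int × Sum (List Char) Int := (p.1, Sum.inr (aNum p.2))

theorem aD3_keys (files : List String) :
    (aD3 files).keys = (isort ltL (ePairs files)).map Prod.fst := by
  have hs3 : PySem.List.sorted (aD2 files).items (fun p => aIntOf p.2) false
      = (isort ltL (ePairs files)).map w2 := by
    rw [aD2_items, PySem.List.sorted_eq_foldl_insertBy]
    have := isort_map lt2 (fun a b => decide (aIntOf a.2 < aIntOf b.2))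
      w2 (fun a b => rfl) (isort lt1 (ePairs files)) []
    have h2 : (isort lt1 (ePairs files)).map (fun p => (p.1, Sum.inr (aNum p.2)))
        = (isort lt1 (ePairs files)).map w2 := rfl
    rw [h2, ← isort_lt2_lt1 files]
    simpa [isort] using this
  have hperm : (isort ltL (ePairs files)).Perm (ePairs files) := by
    rw [← isort_lt2_lt1]
    have h1 : isort lt1 (ePairs files)
        = PySem.List.sorted (ePairs files) (fun p => p.2) false := by
      rw [PySem.List.sorted_eq_foldl_insertBy]; rfl
    have h2 : isort lt2 (isort lt1 (ePairs files))
        = PySem.List.sorted (isort lt1 (ePairs files)) (fun p => aNum p.2) false := by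
      rw [PySem.List.sorted_eq_foldl_insertBy]; rfl
    rw [h2, h1]
    exact (PySem.List.sorted_perm _ _ _).trans (PySem.List.sorted_perm _ _ _)
  have hnodup : (((isort ltL (ePairs files)).map w2).map Prod.fst).Nodup := by
    have := (hperm.map Prod.fst).nodup_iff.2 (ePairs_fst_nodup files)
    simpa [List.map_map, w2, Function.comp] using this
  have : (aD3 files).items = (isort ltL (ePairs files)).map w2 := by
    rw [aD3, hs3, items_ofList_of_nodup _ hnodup]
  show (aD3 files).items.map Prod.fst = _
  rw [this, List.map_map]
  rfl

theorem solution_eq_isort (files : List String) :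
    solution files = (isort ltL (ePairs files)).map (fun p => PySem.List.pyGetD files p.1 "") := by
  unfold solution
  rw [PySem.List.foldl_append_singleton_eq_map, aD3_keys, List.map_map]
  simp [Function.comp]

theorem files_eq_map_ePairs (files : List String) :
    files = (ePairs files).map (fun p => String.ofList p.2) := by
  apply List.ext_getElem
  · simp [ePairs]
  · intro i hi hi2
    simp [ePairs, List.getD_eq_getElem?_getD, List.getElem?_eq_getElem hi, String.ofList_toList]

theorem solution_alt_eq_isort (files : List String) :
    solution_alt files = (isort ltL (ePairs files)).map (fun p => String.ofList p.2) := by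
  have hB : ∀ a b : Int × List Char,
      (decide (altNum (String.ofList a.2) < altNum (String.ofList b.2)) ||
        (!decide (altNum (String.ofList b.2) < altNum (String.ofList a.2)) &&
          decide (String.ofList a.2 < String.ofList b.2))) = ltL a b := by
    intro a b
    rw [← aNum_eq_altNum a.2, ← aNum_eq_altNum b.2]
    unfold ltL lt1 lt2
    have hs : decide (String.ofList a.2 < String.ofList b.2) = decide (a.2 < b.2) := by
      apply decide_eq_decide.2
      rw [String.lt_iff_toList_lt]
      simp
    rw [hs]
  have hconv : solution_alt files
      = isort (fun f g : String =>
          decide (altNum f < altNum g) || (!decide (altNum g < altNum f) && decide (f < g))) files := rfl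
  rw [hconv]
  conv_lhs => rw [files_eq_map_ePairs files]
  have := isort_map ltL
    (fun f g : String =>
      decide (altNum f < altNum g) || (!decide (altNum g < altNum f) && decide (f < g)))
    (fun p : Int × List Char => String.ofList p.2) (fun a b => hB a b) (ePairs files) []
  simpa [isort] using this

-- ===== VERDICT (by name: the statement is the Claim_ definition above) =====
theorem solution_spec : Claim_equal_solution := by
  intro files _ _
  unfold Spec_solution
  rw [solution_eq_isort, solution_alt_eq_isort]
  apply List.map_congr_left
  intro p hp
  have hmem : p ∈ ePairs files := by
    rcases mem_foldl_insertBy _ _ _ _ hp with h | h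
    · simp at h
    · exact h
  simp only [ePairs, List.mem_map] at hmem
  obtain ⟨i, hi, rfl⟩ := hmem
  rw [PySem.List.pyGetD_natCast]
  simp [String.ofList_toList]

def solution_raises : Claim_raises_solution := by
  unfold Claim_raises_solution
  constructor
  · intro files _ hr hpre
    obtain ⟨f, hf, hall⟩ := hr.2
    exact (hpre f hf).2 hall
  · exact ⟨by decide, by decide, by decide⟩
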